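-- pv_equiv track=rewrite | github.com/zazabap/problem-reductions | docs/paper/verify-reductions/adversary_exact_cover_by_3_sets_acyclic_partition.py | adv_solve_x3c
-- ===== SOURCE A (Python) =====
-- from itertools import combinations, product
-- from typing import Optional
--
-- def adv_solve_x3c(universe_size: int, subsets: list[list[int]]) -> Optional[list[int]]:
--     """Brute-force X3C solver."""
--     q = universe_size // 3
--     m = len(subsets)
--     for combo in combinations(range(m), q):
--         covered = set()
--         ok = True
--         for idx in combo:
--             if set(subsets[idx]) & covered:
--                 ok = False
--                 break
--             covered |= set(subsets[idx])
--         if ok and covered == set(range(universe_size)):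
--             cfg = [0] * m
--             for idx in combo:
--                 cfg[idx] = 1
--             return cfg
--     return None
-- ===== SOURCE B (Python) =====
-- from typing import Optional
--
-- def adv_solve_x3c(universe_size: int, subsets: list[list[int]]) -> Optional[list[int]]:
--     """Recursive backtracking X3C solver: choose subset indices in increasing
--     order, pruning any subset that overlaps the already-covered elements."""
--     q = universe_size // 3
--     m = len(subsets)
--     universe = set(range(universe_size))
--
--     def dfs(need, start, covered, chosen):
--         if need == 0:
--             if covered == universe:
--                 cfg = [0] * m
--                 for i in chosen:
--                     cfg[i] = 1
--                 return cfg
--             return None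
--         for i in range(start, m):
--             s = set(subsets[i])
--             if s & covered:
--                 continue
--             res = dfs(need - 1, i + 1, covered | s, chosen + [i])
--             if res is not None:
--                 return res
--         return None
--
--     return dfs(q, 0, set(), [])
-- ===== Notes on version B (the rewrite author's own statement) =====
-- stated objective: alternative
-- what changed: Replaced the generate-then-test enumeration of all q-combinations with a recursive backtracking DFS that threads the covered set and prunes any branch whose next subset overlaps it, so conflicting prefixes are never extended.
import Mathlib
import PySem

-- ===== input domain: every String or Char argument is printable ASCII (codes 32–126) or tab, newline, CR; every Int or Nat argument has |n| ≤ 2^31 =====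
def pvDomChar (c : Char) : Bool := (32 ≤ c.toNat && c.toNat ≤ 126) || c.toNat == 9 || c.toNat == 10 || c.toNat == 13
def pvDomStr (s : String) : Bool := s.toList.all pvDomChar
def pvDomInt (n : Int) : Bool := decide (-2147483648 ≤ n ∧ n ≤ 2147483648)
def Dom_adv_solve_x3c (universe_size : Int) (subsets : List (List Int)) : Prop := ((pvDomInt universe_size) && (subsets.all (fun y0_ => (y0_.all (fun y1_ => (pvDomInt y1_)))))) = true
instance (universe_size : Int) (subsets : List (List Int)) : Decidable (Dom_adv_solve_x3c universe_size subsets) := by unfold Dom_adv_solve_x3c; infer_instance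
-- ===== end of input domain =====

-- B replaces A's generate-then-test enumeration of all q-combinations by a pruned
-- recursive backtracking search (alternative algorithm, same first answer).

-- ===== PORT A =====
-- itertools.combinations(xs, k) in lexicographic order (exact enumeration order)
def pyCombos : List Nat → Nat → List (List Nat)
  | _, 0 => [[]]
  | [], _ + 1 => []
  | x :: xs, k + 1 => (pyCombos xs k).map (x :: ·) ++ pyCombos xs (k + 1)

-- the inner 'for idx in combo' loop of A: returns (covered, ok)
def comboLoopA (subsets : List (List Int)) : List Nat → PySem.Set Int → PySem.Set Int × Bool
  | [], covered => (covered, true)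
  | idx :: rest, covered =>
      let s := PySem.Set.ofList (subsets.getD idx [])
      if PySem.Set.inter s covered ≠ [] then (covered, false)
      else comboLoopA subsets rest (PySem.Set.union covered s)

-- the outer 'for combo in combinations(...)' loop of A, with its early return
def searchA (universe_size : Int) (subsets : List (List Int)) (m : Nat) : List (List Nat) → Option (List Int)
  | [] => none
  | combo :: rest =>
      let r := comboLoopA subsets combo PySem.Set.empty
      if r.2 ∧ PySem.Set.equal r.1 (PySem.Set.ofList (PySem.List.pyRange 0 universe_size 1)) then
        some (combo.foldl (fun cfg idx => cfg.set idx 1) (List.replicate m 0))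
      else searchA universe_size subsets m rest

def adv_solve_x3c (universe_size : Int) (subsets : List (List Int)) : Option (List Int) :=
  let q := PySem.Int.floordiv universe_size 3
  let m := subsets.length
  searchA universe_size subsets m (pyCombos (List.range m) q.toNat)

-- ===== PORT B =====
-- B's dfs(need, start, covered, chosen); the 'for i in range(start, m)' loop is the
-- recursion over the remaining candidate-index list.
def dfsB (subsets : List (List Int)) (m : Nat) (univ : PySem.Set Int) : List Nat → Int → PySem.Set Int → List Nat → Option (List Int)
  | cands, need, covered, chosen =>
    if need = 0 then
      if PySem.Set.equal covered univ then
        some (chosen.foldl (fun cfg i => cfg.set i 1) (List.replicate m 0))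
      else none
    else
      match cands with
      | [] => none
      | i :: rest =>
          let s := PySem.Set.ofList (subsets.getD i [])
          if PySem.Set.inter s covered ≠ [] then dfsB subsets m univ rest need covered chosen
          else
            match dfsB subsets m univ rest (need - 1) (PySem.Set.union covered s) (chosen ++ [i]) with
            | some res => some res
            | none => dfsB subsets m univ rest need covered chosen
  termination_by structural cands => cands

def adv_solve_x3c_alt (universe_size : Int) (subsets : List (List Int)) : Option (List Int) :=
  let q := PySem.Int.floordiv universe_size 3
  let m := subsets.length
  let univ := PySem.Set.ofList (PySem.List.pyRange 0 universe_size 1)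
  dfsB subsets m univ (List.range m) q PySem.Set.empty []

-- ===== PRECONDITION & SPEC =====
-- Pre_ excludes universe_size < 0, where q = universe_size // 3 is negative and
-- combinations(range(m), q) raises ValueError in A.
def Pre_adv_solve_x3c (universe_size : Int) (subsets : List (List Int)) : Prop := 0 ≤ universe_size
instance (universe_size : Int) (subsets : List (List Int)) : Decidable (Pre_adv_solve_x3c universe_size subsets) := by unfold Pre_adv_solve_x3c; infer_instance
def pvWitness_adv_solve_x3c : Int × List (List Int) := (3, [[0, 1], [0, 1, 2]])

def Spec_adv_solve_x3c (universe_size : Int) (subsets : List (List Int)) (out : Option (List Int)) : Prop := out = adv_solve_x3c_alt universe_size subsets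
instance (universe_size : Int) (subsets : List (List Int)) (out : Option (List Int)) : Decidable (Spec_adv_solve_x3c universe_size subsets out) := by unfold Spec_adv_solve_x3c; infer_instance

-- ===== CLAIM (what is proved, stated in full; the proofs are below) =====
def Claim_equal_adv_solve_x3c : Prop := ∀ (universe_size : Int) (subsets : List (List Int)), Dom_adv_solve_x3c universe_size subsets → Pre_adv_solve_x3c universe_size subsets → Spec_adv_solve_x3c universe_size subsets (adv_solve_x3c universe_size subsets)

-- ===== LEMMAS AND PROOFS =====

-- searchA is findSome? of the per-combination check
def checkA (universe_size : Int) (subsets : List (List Int)) (m : Nat) (chosen : List Nat) (covered : PySem.Set Int) (combo : List Nat) : Option (List Int) :=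
  let r := comboLoopA subsets combo covered
  if r.2 ∧ PySem.Set.equal r.1 (PySem.Set.ofList (PySem.List.pyRange 0 universe_size 1)) then
    some ((chosen ++ combo).foldl (fun cfg idx => cfg.set idx 1) (List.replicate m 0))
  else none

lemma searchA_eq_findSome (universe_size : Int) (subsets : List (List Int)) (m : Nat) (l : List (List Nat)) :
    searchA universe_size subsets m l = l.findSome? (checkA universe_size subsets m [] PySem.Set.empty) := by
  induction l with
  | nil => rfl
  | cons c rest ih =>
      simp only [searchA, List.findSome?_cons, checkA, List.nil_append]
      split_ifs with h
      · simp
      · simpa [checkA, h] using ih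

lemma dfsB_eq_findSome (subsets : List (List Int)) (m : Nat) (universe_size : Int) :
    ∀ (cands : List Nat) (need : Nat) (covered : PySem.Set Int) (chosen : List Nat),
      dfsB subsets m (PySem.Set.ofList (PySem.List.pyRange 0 universe_size 1)) cands (need : Int) covered chosen
        = (pyCombos cands need).findSome? (checkA universe_size subsets m chosen covered) := by
  intro cands
  induction cands with
  | nil =>
      intro need covered chosen
      cases need with
      | zero =>
          rw [dfsB]
          simp only [pyCombos, Nat.cast_zero, List.findSome?_cons, List.findSome?_nil,
            checkA, comboLoopA, true_and]
          cases h : PySem.Set.equal covered (PySem.Set.ofList (PySem.List.pyRange 0 universe_size 1)) <;> simp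
      | succ k =>
          rw [dfsB]
          have hne : ¬ ((k + 1 : Nat) : Int) = 0 := by exact_mod_cast Nat.succ_ne_zero k
          rw [if_neg hne]
          simp [pyCombos]
  | cons i rest ih =>
      intro need covered chosen
      cases need with
      | zero =>
          rw [dfsB]
          simp only [pyCombos, Nat.cast_zero, List.findSome?_cons, List.findSome?_nil,
            checkA, comboLoopA, true_and]
          cases h : PySem.Set.equal covered (PySem.Set.ofList (PySem.List.pyRange 0 universe_size 1)) <;> simp
      | succ k =>
          rw [dfsB]
          have hne : ¬ ((k + 1 : Nat) : Int) = 0 := by exact_mod_cast Nat.succ_ne_zero k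
          rw [if_neg hne]
          simp only [pyCombos, List.findSome?_append, List.findSome?_map]
          by_cases hov : PySem.Set.inter (PySem.Set.ofList (subsets.getD i [])) covered = []
          · -- no overlap: descend
            rw [if_neg (not_not_intro hov)]
            have hc : ((k + 1 : Nat) : Int) - 1 = (k : Int) := by push_cast; ring
            rw [hc, ih k _ (chosen ++ [i]), ih (k + 1) covered chosen]
            have hmap : (checkA universe_size subsets m chosen covered) ∘ (i :: ·)
                = checkA universe_size subsets m (chosen ++ [i])
                    (PySem.Set.union covered (PySem.Set.ofList (subsets.getD i []))) := by
              funext c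
              simp only [Function.comp_apply, checkA, comboLoopA]
              split_ifs <;> simp_all
            rw [hmap]
            cases (pyCombos rest k).findSome? (checkA universe_size subsets m (chosen ++ [i])
                (PySem.Set.union covered (PySem.Set.ofList (subsets.getD i [])))) <;> simp
          · -- overlap: pruned branch is all-none on the A side
            rw [if_pos hov]
            have hnone : (pyCombos rest k).findSome?
                ((checkA universe_size subsets m chosen covered) ∘ (i :: ·)) = none := by
              rw [List.findSome?_eq_none_iff]
              intro c _
              simp only [Function.comp_apply, checkA, comboLoopA]
              split_ifs <;> simp_all
            rw [hnone]
            simpa using ih (k + 1) covered chosen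

-- ===== VERDICT (by name: the statement is the Claim_ definition above) =====
theorem adv_solve_x3c_spec : Claim_equal_adv_solve_x3c := by
  intro universe_size subsets _ hpre
  unfold Spec_adv_solve_x3c adv_solve_x3c adv_solve_x3c_alt
  dsimp only
  have hq : 0 ≤ PySem.Int.floordiv universe_size 3 := by
    rw [PySem.Int.floordiv_eq_ediv_of_pos (by norm_num)]
    exact Int.ediv_nonneg hpre (by norm_num)
  have hcast : PySem.Int.floordiv universe_size 3
      = ((PySem.Int.floordiv universe_size 3).toNat : Int) := (Int.toNat_of_nonneg hq).symm
  rw [searchA_eq_findSome]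
  rw [hcast]
  exact (dfsB_eq_findSome subsets subsets.length universe_size (List.range subsets.length)
    (PySem.Int.floordiv universe_size 3).toNat PySem.Set.empty []).symm
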